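-- pv_equiv track=rewrite | github.com/jaimejaramilloarias/Generador-de-montunos | backend/salsa.py | _ajustar_primera_voz_grave
-- ===== SOURCE A (Python) =====
-- from typing import List, Tuple, Dict, Optional, Set, Iterable
--
-- RANGO_BAJO_MIN = 48  # C3
--
-- RANGO_BAJO_MAX = 60  # C4
--
-- def _ajustar_primera_voz_grave(pitch: int) -> int:
--     """Garantiza que la primera nota grave quede entre C3 y C4."""
--
--     candidatos: List[int] = []
--     for offset in range(-2, 3):
--         candidato = pitch + 12 * offset
--         while candidato < RANGO_BAJO_MIN:
--             candidato += 12
--         while candidato > RANGO_BAJO_MAX: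
--             candidato -= 12
--         candidatos.append(candidato)
--
--     objetivo = RANGO_BAJO_MAX
--     return min(candidatos, key=lambda nota: (abs(nota - objetivo), -nota))
-- ===== SOURCE B (Python) =====
-- RANGO_BAJO_MIN = 48  # C3
--
-- RANGO_BAJO_MAX = 60  # C4
--
-- def _ajustar_primera_voz_grave(pitch: int) -> int:
--     """Garantiza que la primera nota grave quede entre C3 y C4.
--
--     Closed form: the largest pitch-class representative of ``pitch`` that is
--     <= C4 (RANGO_BAJO_MAX), i.e. the in-range note nearest to C4 with ties
--     going to the higher note.
--     """
--     return RANGO_BAJO_MAX - ((RANGO_BAJO_MAX - pitch) % 12)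
-- ===== Notes on version B (the rewrite author's own statement) =====
-- stated objective: simpler
-- what changed: Replaced the five-candidate loop with two correction while-loops plus a keyed min by a single closed-form modulo expression 60 - ((60 - pitch) % 12).
-- intended difference: For pitch ≡ 0 (mod 12) with pitch < 36 A's offset window (±2 octaves) never reaches C4 and it returns 48 (C3); B returns 60 (C4), which is the intended value under A's own tie-break key (nearest to C4, ties to the higher note). — e.g. on _ajustar_primera_voz_grave(0): A returns 48, B returns 60
import Mathlib
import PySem

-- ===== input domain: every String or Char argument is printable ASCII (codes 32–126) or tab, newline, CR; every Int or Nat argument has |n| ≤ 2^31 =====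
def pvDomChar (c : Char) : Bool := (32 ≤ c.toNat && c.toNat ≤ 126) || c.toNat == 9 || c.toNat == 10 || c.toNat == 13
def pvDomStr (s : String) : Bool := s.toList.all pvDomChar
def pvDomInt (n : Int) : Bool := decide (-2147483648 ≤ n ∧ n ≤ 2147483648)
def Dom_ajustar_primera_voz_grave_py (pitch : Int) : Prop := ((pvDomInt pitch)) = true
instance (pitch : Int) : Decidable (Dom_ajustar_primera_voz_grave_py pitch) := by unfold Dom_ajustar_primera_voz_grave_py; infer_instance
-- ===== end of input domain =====

-- B replaces A's five-candidate search (two correction while-loops per candidate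
-- plus a keyed min) by the closed form 60 - ((60 - pitch) % 12); simpler and O(1).

-- ===== PORT A =====
-- `while candidato < RANGO_BAJO_MIN: candidato += 12`
def pyWrapUp (candidato : Int) : Int :=
  if candidato < 48 then pyWrapUp (candidato + 12) else candidato
termination_by (48 - candidato).toNat
decreasing_by omega

-- `while candidato > RANGO_BAJO_MAX: candidato -= 12`
def pyWrapDown (candidato : Int) : Int :=
  if candidato > 60 then pyWrapDown (candidato - 12) else candidato
termination_by (candidato - 60).toNat
decreasing_by omega

def ajustar_primera_voz_grave_py (pitch : Int) : Int :=
  let candidatos : List Int :=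
    (PySem.List.pyRange (-2) 3 1).map (fun offset =>
      pyWrapDown (pyWrapUp (pitch + 12 * offset)))
  let objetivo : Int := 60
  -- candidatos has five elements, so Python's min never raises; getD 0 is unreachable
  (PySem.List.min2? candidatos (fun nota => |nota - objetivo|) (fun nota => -nota)).getD 0

-- ===== PORT B =====
def ajustar_primera_voz_grave_py_alt (pitch : Int) : Int :=
  60 - PySem.Int.mod (60 - pitch) 12

-- ===== PRECONDITION & SPEC =====
-- For pitch ≡ 0 (mod 12) with pitch < 36 A's ±2-octave offset window never reaches C4
-- and A returns 48 (C3); B returns 60 (C4), the intended value under A's own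
-- tie-break key (nearest to C4, ties to the higher note).
def D_ajustar_primera_voz_grave_py (pitch : Int) : Prop := pitch % 12 = 0 ∧ pitch < 36
instance (pitch : Int) : Decidable (D_ajustar_primera_voz_grave_py pitch) := by unfold D_ajustar_primera_voz_grave_py; infer_instance

def Spec_ajustar_primera_voz_grave_py (pitch : Int) (out : Int) : Prop :=
  ¬ D_ajustar_primera_voz_grave_py pitch → out = ajustar_primera_voz_grave_py_alt pitch
instance (pitch : Int) (out : Int) : Decidable (Spec_ajustar_primera_voz_grave_py pitch out) := by unfold Spec_ajustar_primera_voz_grave_py; infer_instance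

def pvDiffWitness_ajustar_primera_voz_grave_py : Int := 0
def pvDiffWitnessOut_ajustar_primera_voz_grave_py : Int × Int := (48, 60)

-- ===== CLAIM (what is proved, stated in full; the proofs are below) =====
def Claim_unchanged_ajustar_primera_voz_grave_py : Prop := ∀ (pitch : Int), Dom_ajustar_primera_voz_grave_py pitch → Spec_ajustar_primera_voz_grave_py pitch (ajustar_primera_voz_grave_py pitch)
def Claim_changed_ajustar_primera_voz_grave_py : Prop := Dom_ajustar_primera_voz_grave_py (pvDiffWitness_ajustar_primera_voz_grave_py) ∧ D_ajustar_primera_voz_grave_py (pvDiffWitness_ajustar_primera_voz_grave_py) ∧ ajustar_primera_voz_grave_py (pvDiffWitness_ajustar_primera_voz_grave_py) = pvDiffWitnessOut_ajustar_primera_voz_grave_py.1 ∧ ajustar_primera_voz_grave_py_alt (pvDiffWitness_ajustar_primera_voz_grave_py) = pvDiffWitnessOut_ajustar_primera_voz_grave_py.2 ∧ pvDiffWitnessOut_ajustar_primera_voz_grave_py.1 ≠ pvDiffWitnessOut_ajustar_primera_voz_grave_py.2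
def Claim_exact_ajustar_primera_voz_grave_py : Prop := ∀ (pitch : Int), Dom_ajustar_primera_voz_grave_py pitch → D_ajustar_primera_voz_grave_py pitch → ajustar_primera_voz_grave_py pitch ≠ ajustar_primera_voz_grave_py_alt pitch

-- ===== LEMMAS AND PROOFS =====

theorem pyWrapUp_eq (c : Int) :
    pyWrapUp c = if c < 48 then 48 + (c - 48) % 12 else c := by
  fun_induction pyWrapUp c with
  | case1 c h ih =>
    rw [ih]
    split_ifs <;> omega
  | case2 c h =>
    split_ifs <;> omega

theorem pyWrapDown_eq (c : Int) :
    pyWrapDown c = if c > 60 then 60 - (60 - c) % 12 else c := by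
  fun_induction pyWrapDown c with
  | case1 c h ih =>
    rw [ih]
    split_ifs <;> omega
  | case2 c h =>
    split_ifs <;> omega

def pvCand (x : Int) : Int :=
  if x < 48 then 48 + (x - 48) % 12 else if x ≤ 60 then x else 60 - (60 - x) % 12

theorem cand_eq (x : Int) : pyWrapDown (pyWrapUp x) = pvCand x := by
  rw [pyWrapUp_eq]
  unfold pvCand
  by_cases h1 : x < 48
  · rw [if_pos h1, if_pos h1, pyWrapDown_eq]
    split_ifs <;> omega
  · rw [if_neg h1, if_neg h1, pyWrapDown_eq]
    split_ifs <;> omega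

def pvStep (acc : Option Int) (x : Int) : Option Int :=
  match acc with
  | none => some x
  | some m =>
    if (decide (|x - 60| < |m - 60|) || !decide (|m - 60| < |x - 60|) && decide (-x < -m)) = true
    then some x else some m

theorem min2?_eq_fold (xs : List Int) :
    PySem.List.min2? xs (fun nota => |nota - (60 : Int)|) (fun nota => -nota) =
      xs.foldl pvStep none := by
  unfold PySem.List.min2?
  congr 1
  funext acc x
  cases acc <;> rfl

theorem pvStep_vv (v : Int) : pvStep (some v) v = some v := by
  simp [pvStep]

theorem pvStep_v48 (v : Int) (hv : 48 < v) (hv60 : v ≤ 60) : pvStep (some v) 48 = some v := by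
  simp only [pvStep]
  rw [if_neg]
  simp only [Bool.or_eq_true, Bool.and_eq_true, Bool.not_eq_true', decide_eq_true_eq,
    decide_eq_false_iff_not, Int.abs_eq_natAbs, not_or, not_and]
  constructor
  · omega
  · intro h; omega

theorem pvStep_48v (v : Int) (hv : 48 < v) (hv60 : v ≤ 60) : pvStep (some 48) v = some v := by
  simp only [pvStep]
  rw [if_pos]
  simp only [Bool.or_eq_true, decide_eq_true_eq, Int.abs_eq_natAbs]
  left
  omega

theorem pvFold_absorb (v : Int) (hv : 48 < v) (hv60 : v ≤ 60) :
    ∀ xs : List Int, (∀ x ∈ xs, x = v ∨ x = 48) → xs.foldl pvStep (some v) = some v := by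
  intro xs
  induction xs with
  | nil => intro _; rfl
  | cons a t ih =>
    intro h
    rcases h a (by simp) with h' | h'
    · rw [List.foldl_cons, h', pvStep_vv]
      exact ih (fun x hx => h x (by simp [hx]))
    · rw [List.foldl_cons, h', pvStep_v48 v hv hv60]
      exact ih (fun x hx => h x (by simp [hx]))

theorem pvFold_48 (v : Int) (hv : 48 < v) (hv60 : v ≤ 60) :
    ∀ xs : List Int, (∀ x ∈ xs, x = v ∨ x = 48) →
      xs.foldl pvStep (some 48) = some v ∨ xs.foldl pvStep (some 48) = some 48 := by
  intro xs
  induction xs with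
  | nil => intro _; right; rfl
  | cons a t ih =>
    intro h
    rcases h a (by simp) with h' | h'
    · rw [List.foldl_cons, h', pvStep_48v v hv hv60]
      left; exact pvFold_absorb v hv hv60 t (fun x hx => h x (by simp [hx]))
    · rw [List.foldl_cons, h']
      have : pvStep (some 48) 48 = some 48 := by simp [pvStep]
      rw [this]
      exact ih (fun x hx => h x (by simp [hx]))

theorem pvFold_none (v : Int) (hv : 48 < v) (hv60 : v ≤ 60) (xs : List Int)
    (h : ∀ x ∈ xs, x = v ∨ x = 48) :
    xs.foldl pvStep none = some v ∨ xs.foldl pvStep none = some 48 ∨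
      xs.foldl pvStep none = none := by
  cases xs with
  | nil => right; right; rfl
  | cons a t =>
    rw [List.foldl_cons]
    have hstep : pvStep none a = some a := rfl
    rw [hstep]
    rcases h a (by simp) with h' | h'
    · rw [h']
      left; exact pvFold_absorb v hv hv60 t (fun x hx => h x (by simp [hx]))
    · rw [h']
      rcases pvFold_48 v hv hv60 t (fun x hx => h x (by simp [hx])) with h1 | h1
      · left; exact h1
      · right; left; exact h1

theorem pvMin5 (v a b c d : Int) (hv : 48 < v) (hv60 : v ≤ 60)
    (ha : a = v ∨ a = 48) (hb : b = v ∨ b = 48) (hc : c = v ∨ c = 48) (hd : d = v ∨ d = 48) :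
    PySem.List.min2? [a, b, c, d, v] (fun nota => |nota - (60 : Int)|) (fun nota => -nota) =
      some v := by
  rw [min2?_eq_fold, show [a, b, c, d, v] = [a, b, c, d] ++ [v] from rfl, List.foldl_append]
  have hall : ∀ x ∈ [a, b, c, d], x = v ∨ x = 48 := by
    intro x hx
    simp only [List.mem_cons, List.not_mem_nil, or_false] at hx
    rcases hx with rfl | rfl | rfl | rfl
    · exact ha
    · exact hb
    · exact hc
    · exact hd
  rcases pvFold_none v hv hv60 [a, b, c, d] hall with h1 | h1 | h1 <;> rw [h1, List.foldl_cons]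
  · rw [pvStep_vv]; rfl
  · rw [pvStep_48v v hv hv60]; rfl
  · rfl

theorem ajustar_closed (pitch : Int) :
    ajustar_primera_voz_grave_py pitch =
      if pitch % 12 = 0 ∧ pitch < 36 then 48 else 60 - (60 - pitch) % 12 := by
  show (PySem.List.min2? ((PySem.List.pyRange (-2) 3 1).map (fun offset =>
      pyWrapDown (pyWrapUp (pitch + 12 * offset)))) (fun nota => |nota - 60|)
      (fun nota => -nota)).getD 0 = _
  rw [show PySem.List.pyRange (-2) 3 1 = [-2, -1, 0, 1, 2] from by decide]
  simp only [List.map, cand_eq]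
  by_cases hD : pitch % 12 = 0 ∧ pitch < 36
  · rw [if_pos hD]
    have h1 : pvCand (pitch + 12 * -2) = 48 := by unfold pvCand; split_ifs <;> omega
    have h2 : pvCand (pitch + 12 * -1) = 48 := by unfold pvCand; split_ifs <;> omega
    have h3 : pvCand (pitch + 12 * 0) = 48 := by unfold pvCand; split_ifs <;> omega
    have h4 : pvCand (pitch + 12 * 1) = 48 := by unfold pvCand; split_ifs <;> omega
    have h5 : pvCand (pitch + 12 * 2) = 48 := by unfold pvCand; split_ifs <;> omega
    rw [h1, h2, h3, h4, h5]
    decide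
  · rw [if_neg hD]
    have hv : 48 < 60 - (60 - pitch) % 12 := by omega
    have hv60 : 60 - (60 - pitch) % 12 ≤ 60 := by omega
    have h5 : pvCand (pitch + 12 * 2) = 60 - (60 - pitch) % 12 := by
      unfold pvCand; split_ifs <;> omega
    have h1 : pvCand (pitch + 12 * -2) = 60 - (60 - pitch) % 12 ∨ pvCand (pitch + 12 * -2) = 48 := by
      unfold pvCand; split_ifs <;> omega
    have h2 : pvCand (pitch + 12 * -1) = 60 - (60 - pitch) % 12 ∨ pvCand (pitch + 12 * -1) = 48 := by
      unfold pvCand; split_ifs <;> omega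
    have h3 : pvCand (pitch + 12 * 0) = 60 - (60 - pitch) % 12 ∨ pvCand (pitch + 12 * 0) = 48 := by
      unfold pvCand; split_ifs <;> omega
    have h4 : pvCand (pitch + 12 * 1) = 60 - (60 - pitch) % 12 ∨ pvCand (pitch + 12 * 1) = 48 := by
      unfold pvCand; split_ifs <;> omega
    rw [h5, pvMin5 _ _ _ _ _ hv hv60 h1 h2 h3 h4]
    rfl

-- ===== VERDICT (by name: the statement is the Claim_ definition above) =====
theorem ajustar_primera_voz_grave_py_spec : Claim_unchanged_ajustar_primera_voz_grave_py := by
  intro pitch _ hD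
  rw [ajustar_closed]
  have : ¬ (pitch % 12 = 0 ∧ pitch < 36) := hD
  rw [if_neg this]
  show _ = 60 - PySem.Int.mod (60 - pitch) 12
  simp only [PySem.Int.mod]
  rw [Int.fmod_eq_emod]
  norm_num

theorem ajustar_primera_voz_grave_py_changed : Claim_changed_ajustar_primera_voz_grave_py := by
  unfold Claim_changed_ajustar_primera_voz_grave_py
  refine ⟨by decide, by decide, ?_, by decide, by decide⟩
  rw [ajustar_closed]; decide

theorem ajustar_primera_voz_grave_py_tight : Claim_exact_ajustar_primera_voz_grave_py := by
  intro pitch _ hD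
  have hD' : pitch % 12 = 0 ∧ pitch < 36 := hD
  rw [ajustar_closed, if_pos hD']
  show (48 : Int) ≠ 60 - PySem.Int.mod (60 - pitch) 12
  simp only [PySem.Int.mod]
  rw [Int.fmod_eq_emod]
  norm_num
  omega
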